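-- pv_equiv track=rewrite | github.com/RazinAleksandr/Pipe-water-count | Application/utils.py | upward_section
-- ===== SOURCE A (Python) =====
-- def upward_section(LZ):
-- 	sections = {}
-- 	lst = []
-- 	j = 0
-- 	for i in range(len(LZ) - 1):
-- 		if LZ[i][1] <= LZ[i + 1][1]:
-- 			if LZ[i] not in lst:
-- 				lst.append(LZ[i])
-- 			lst.append(LZ[i + 1])
-- 		else:
-- 			if len(lst) > 0:
-- 				sections[j] = lst
-- 			lst = []
-- 			j += 1
-- 	if len(lst) > 0:
-- 		sections[j] = lst
-- 	return sections
-- ===== SOURCE B (Python) =====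
-- def upward_section(LZ):
--     asc = [LZ[i][1] <= LZ[i + 1][1] for i in range(len(LZ) - 1)]
--     res = {}
--     falses = 0
--     i = 0
--     n = len(asc)
--     while i < n:
--         if asc[i]:
--             j = i
--             while j < n and asc[j]:
--                 j += 1
--             res[falses] = LZ[i:j + 1]
--             i = j
--         else:
--             falses += 1
--             i += 1
--     return res
-- ===== Notes on version B (the rewrite author's own statement) =====
-- stated objective: alternative
-- what changed: B precomputes the boolean list of non-decreasing boundaries, then groups maximal runs of True in one pass, emitting each section as a contiguous slice LZ[i:j+1] keyed by the running count of descending boundaries, instead of A's element-by-element list accumulation with a membership test.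
import Mathlib
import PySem

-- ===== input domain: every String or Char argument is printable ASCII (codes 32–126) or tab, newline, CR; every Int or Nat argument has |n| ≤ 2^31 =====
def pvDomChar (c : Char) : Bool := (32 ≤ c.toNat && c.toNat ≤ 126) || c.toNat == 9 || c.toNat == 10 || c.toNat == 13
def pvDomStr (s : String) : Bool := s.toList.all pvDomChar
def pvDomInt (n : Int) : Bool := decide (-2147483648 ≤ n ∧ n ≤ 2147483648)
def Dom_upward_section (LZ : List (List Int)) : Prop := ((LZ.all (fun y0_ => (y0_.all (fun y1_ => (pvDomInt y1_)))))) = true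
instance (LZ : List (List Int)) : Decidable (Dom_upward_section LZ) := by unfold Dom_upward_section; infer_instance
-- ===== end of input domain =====

-- B groups maximal runs of the precomputed non-decreasing-boundary booleans and emits contiguous
-- slices, instead of A's element-by-element accumulation; alternative decomposition, same result.

-- ===== PORT A =====
-- the for-loop of A as structural recursion over the index list, state (sections, lst, j)
def upward_section_aLoop (LZ : List (List Int)) :
    List Int → PySem.Dict Int (List (List Int)) × List (List Int) × Int →
    PySem.Dict Int (List (List Int)) × List (List Int) × Int
  | [], st => st
  | i :: rest, (sections, lst, j) =>
    upward_section_aLoop LZ rest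
      (if PySem.List.pyGetD (PySem.List.pyGetD LZ i []) 1 0 ≤
          PySem.List.pyGetD (PySem.List.pyGetD LZ (i + 1) []) 1 0 then
        let lst := if PySem.List.pyGetD LZ i [] ∈ lst then lst else lst ++ [PySem.List.pyGetD LZ i []]
        (sections, lst ++ [PySem.List.pyGetD LZ (i + 1) []], j)
      else
        ((if lst.length > 0 then sections.insert j lst else sections), ([] : List (List Int)), j + 1))

def upward_section (LZ : List (List Int)) : List (Int × List (List Int)) :=
  let fin := upward_section_aLoop LZ (PySem.List.pyRange 0 ((LZ.length : Int) - 1) 1)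
      (PySem.Dict.empty, [], 0)
  (if fin.2.1.length > 0 then fin.1.insert fin.2.2 fin.2.1 else fin.1).items

-- ===== PORT B =====
-- inner 'while j < n and asc[j]: j += 1' : advance over the leading trues of the remaining booleans
def upward_section_altAdvance : List Bool → Nat → Nat × List Bool
  | [], j => (j, [])
  | b :: rest, j => if b then upward_section_altAdvance rest (j + 1) else (j, b :: rest)

theorem upward_section_altAdvance_len (l : List Bool) (j : Nat) :
    (upward_section_altAdvance l j).2.length ≤ l.length := by
  induction l generalizing j with
  | nil => simp [upward_section_altAdvance]
  | cons b rest ih =>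
    simp only [upward_section_altAdvance]
    split
    · exact (ih (j + 1)).trans (by simp)
    · simp

-- the outer while loop of B, on the remaining booleans with position i and key counter falses
def upward_section_altLoop (LZ : List (List Int)) :
    List Bool → Nat → Int → PySem.Dict Int (List (List Int)) → PySem.Dict Int (List (List Int))
  | [], _, _, res => res
  | b :: rest, i, falses, res =>
    if b then
      let p := upward_section_altAdvance rest (i + 1)
      upward_section_altLoop LZ p.2 p.1 falses
        (res.insert falses (PySem.List.slice LZ (some (i : Int)) (some ((p.1 : Int) + 1))))
    else
      upward_section_altLoop LZ rest (i + 1) (falses + 1) res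
termination_by l => l.length
decreasing_by
  · exact Nat.lt_succ_of_le (upward_section_altAdvance_len rest (i + 1))
  · simp

def upward_section_alt (LZ : List (List Int)) : List (Int × List (List Int)) :=
  let asc := (PySem.List.pyRange 0 ((LZ.length : Int) - 1) 1).map
      (fun i => decide (PySem.List.pyGetD (PySem.List.pyGetD LZ i []) 1 0 ≤
        PySem.List.pyGetD (PySem.List.pyGetD LZ (i + 1) []) 1 0))
  (upward_section_altLoop LZ asc 0 0 PySem.Dict.empty).items

-- ===== PRECONDITION & SPEC =====
-- Pre_ excludes exactly the inputs on which Python A raises IndexError: when LZ has at least two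
-- rows, every row is accessed at index 1, so every row must have length ≥ 2.
def Pre_upward_section (LZ : List (List Int)) : Prop :=
  LZ.length ≤ 1 ∨ ∀ row ∈ LZ, 2 ≤ row.length
instance (LZ : List (List Int)) : Decidable (Pre_upward_section LZ) := by
  unfold Pre_upward_section; infer_instance

def pvWitness_upward_section : List (List Int) := [[0, 1], [0, 2], [0, 0], [0, 3]]

def Spec_upward_section (LZ : List (List Int)) (out : List (Int × List (List Int))) : Prop := out = upward_section_alt LZ
instance (LZ : List (List Int)) (out : List (Int × List (List Int))) : Decidable (Spec_upward_section LZ out) := by unfold Spec_upward_section; infer_instance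

-- ===== CLAIM (what is proved, stated in full; the proofs are below) =====
def Claim_equal_upward_section : Prop := ∀ (LZ : List (List Int)), Dom_upward_section LZ → Pre_upward_section LZ → Spec_upward_section LZ (upward_section LZ)

-- ===== LEMMAS AND PROOFS =====

-- proof-only common normal form: one step per boundary boolean, pending run start p
def pvC (LZ : List (List Int)) :
    List Bool → Nat → Int → PySem.Dict Int (List (List Int)) → Option Nat →
    PySem.Dict Int (List (List Int))
  | [], _, _, res, none => res
  | [], i, j, res, some s =>
    res.insert j (PySem.List.slice LZ (some (s : Int)) (some ((i : Int) + 1)))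
  | b :: rest, i, j, res, p =>
    if b then pvC LZ rest (i + 1) j res (some (p.getD i))
    else
      match p with
      | none => pvC LZ rest (i + 1) (j + 1) res none
      | some s =>
        pvC LZ rest (i + 1) (j + 1)
          (res.insert j (PySem.List.slice LZ (some (s : Int)) (some ((i : Int) + 1)))) none

theorem pvC_run (LZ : List (List Int)) (rest : List Bool) :
    ∀ (i : Nat) (fj : Int) (res : PySem.Dict Int (List (List Int))) (s : Nat),
    pvC LZ rest i fj res (some s) =
      (match upward_section_altAdvance rest i with
       | (j0, []) =>
         res.insert fj (PySem.List.slice LZ (some (s : Int)) (some ((j0 : Int) + 1)))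
       | (j0, _ :: rest'') =>
         pvC LZ rest'' (j0 + 1) (fj + 1)
           (res.insert fj (PySem.List.slice LZ (some (s : Int)) (some ((j0 : Int) + 1)))) none)
    ∧ ((upward_section_altAdvance rest i).2 = [] ∨
        ∃ r', (upward_section_altAdvance rest i).2 = false :: r') := by
  induction rest with
  | nil => intro i fj res s; exact ⟨rfl, Or.inl rfl⟩
  | cons b r ih =>
    intro i fj res s
    by_cases hb : b = true
    · subst hb
      simpa [upward_section_altAdvance, pvC] using ih (i + 1) fj res s
    · simp only [Bool.not_eq_true] at hb; subst hb
      exact ⟨rfl, Or.inr ⟨r, rfl⟩⟩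

theorem altLoop_eq_pvC_aux (LZ : List (List Int)) :
    ∀ (n : Nat) (asuf : List Bool), asuf.length ≤ n →
    ∀ (i : Nat) (fj : Int) (res : PySem.Dict Int (List (List Int))),
    upward_section_altLoop LZ asuf i fj res = pvC LZ asuf i fj res none := by
  intro n
  induction n with
  | zero =>
    intro asuf hlen i fj res
    rw [List.length_eq_zero_iff.mp (Nat.le_zero.mp hlen)]
    rw [upward_section_altLoop, pvC]
  | succ n ih =>
    intro asuf hlen i fj res
    match asuf with
    | [] => rw [upward_section_altLoop, pvC]
    | false :: rest =>
      rw [upward_section_altLoop, pvC]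
      simp only [Bool.false_eq_true, reduceIte]
      exact ih rest (by simpa using hlen) (i + 1) (fj + 1) res
    | true :: rest =>
      obtain ⟨hrun, hshape⟩ := pvC_run LZ rest (i + 1) fj res i
      rcases hq : upward_section_altAdvance rest (i + 1) with ⟨j0, r2⟩
      rw [hq] at hrun hshape
      have hr2len : r2.length ≤ rest.length := by
        have := upward_section_altAdvance_len rest (i + 1)
        rw [hq] at this; exact this
      rw [upward_section_altLoop, pvC]
      simp only [reduceIte, hq, Option.getD]
      rw [hrun]
      rcases hshape with h0 | ⟨r', hr⟩
      · simp only at h0; subst h0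
        rw [upward_section_altLoop]
      · simp only at hr; subst hr
        rw [upward_section_altLoop]
        simp only [Bool.false_eq_true, reduceIte]
        exact ih r' (by simp at hr2len hlen ⊢; omega) (j0 + 1) (fj + 1) _

theorem altLoop_eq_pvC (LZ : List (List Int)) (asuf : List Bool) (i : Nat) (fj : Int)
    (res : PySem.Dict Int (List (List Int))) :
    upward_section_altLoop LZ asuf i fj res = pvC LZ asuf i fj res none :=
  altLoop_eq_pvC_aux LZ asuf.length asuf le_rfl i fj res

-- slice facts (Nat bounds) used by the A-side invariant
theorem pv_slice_snoc (LZ : List (List Int)) (s i : Nat) (hs : s ≤ i + 1)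
    (hi : i + 1 < LZ.length) :
    PySem.List.slice LZ (some (s : Int)) (some ((i : Int) + 2)) =
      PySem.List.slice LZ (some (s : Int)) (some ((i : Int) + 1)) ++ [LZ[i + 1]] := by
  have h1 : ((i : Int) + 2) = ((i + 2 : Nat) : Int) := by push_cast; ring
  have h2 : ((i : Int) + 1) = ((i + 1 : Nat) : Int) := by push_cast; ring
  rw [h1, h2, PySem.List.slice_natCast, PySem.List.slice_natCast]
  have hidx : i + 1 - s < (LZ.drop s).length := by simp; omega
  have htake : i + 2 - s = (i + 1 - s) + 1 := by omega
  have he : s + (i + 1 - s) = i + 1 := by omega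
  rw [htake, List.take_add_one]
  simp [List.getElem?_eq_getElem hidx, List.getElem_drop, he]

theorem pv_mem_slice (LZ : List (List Int)) (s i : Nat) (hs : s ≤ i) (hi : i < LZ.length) :
    LZ[i] ∈ PySem.List.slice LZ (some (s : Int)) (some ((i : Int) + 1)) := by
  have h2 : ((i : Int) + 1) = ((i + 1 : Nat) : Int) := by push_cast; ring
  rw [h2, PySem.List.slice_natCast]
  have hidx : i - s < ((LZ.drop s).take (i + 1 - s)).length := by
    simp [List.length_take, List.length_drop]; omega
  have : ((LZ.drop s).take (i + 1 - s))[i - s] = LZ[i] := by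
    rw [List.getElem_take, List.getElem_drop]
    congr 1
    omega
  exact this ▸ List.getElem_mem hidx

theorem pv_slice_ne_nil (LZ : List (List Int)) (s i : Nat) (hs : s ≤ i) (hi : s < LZ.length) :
    0 < (PySem.List.slice LZ (some (s : Int)) (some ((i : Int) + 1))).length := by
  have h2 : ((i : Int) + 1) = ((i + 1 : Nat) : Int) := by push_cast; ring
  rw [h2, PySem.List.slice_natCast]
  simp [List.length_take, List.length_drop]
  omega

theorem pv_slice_pair (LZ : List (List Int)) (i : Nat) (hi : i + 1 < LZ.length) :
    PySem.List.slice LZ (some (i : Int)) (some ((i : Int) + 2)) = [LZ[i], LZ[i + 1]] := by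
  have h1 : ((i : Int) + 2) = ((i + 2 : Nat) : Int) := by push_cast; ring
  rw [h1, PySem.List.slice_natCast]
  have hd : LZ.drop i = LZ[i] :: LZ.drop (i + 1) := List.drop_eq_getElem_cons (by omega)
  have hd2 : LZ.drop (i + 1) = LZ[i + 1] :: LZ.drop (i + 2) := List.drop_eq_getElem_cons hi
  have ht : i + 2 - i = 2 := by omega
  rw [ht, hd, hd2]
  rfl

-- relation between A's accumulated lst and the pending run start p
def pvRel (LZ : List (List Int)) (i : Nat) (lst : List (List Int)) (p : Option Nat) : Prop :=
  (p = none ∧ lst = []) ∨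
    (∃ s, p = some s ∧ s ≤ i ∧ i < LZ.length ∧
      lst = PySem.List.slice LZ (some (s : Int)) (some ((i : Int) + 1)))

-- A's loop from index i, finalized, equals pvC on the remaining booleans
set_option maxHeartbeats 1000000 in
theorem aLoop_eq_pvC (LZ : List (List Int)) :
    ∀ (k i : Nat), i + k = ((LZ.length : Int) - 1).toNat →
    ∀ (lst : List (List Int)) (p : Option Nat) (fj : Int)
      (res : PySem.Dict Int (List (List Int))), pvRel LZ i lst p →
    (let fin := upward_section_aLoop LZ
        (PySem.List.pyRange (i : Int) ((LZ.length : Int) - 1) 1) (res, lst, fj)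
     (if fin.2.1.length > 0 then fin.1.insert fin.2.2 fin.2.1 else fin.1)) =
      pvC LZ ((PySem.List.pyRange (i : Int) ((LZ.length : Int) - 1) 1).map
        (fun x => decide (PySem.List.pyGetD (PySem.List.pyGetD LZ x []) 1 0 ≤
          PySem.List.pyGetD (PySem.List.pyGetD LZ (x + 1) []) 1 0))) i fj res p := by
  intro k
  induction k with
  | zero =>
    intro i hik lst p fj res hrel
    have hnil : PySem.List.pyRange (i : Int) ((LZ.length : Int) - 1) 1 = [] := by
      apply PySem.List.pyRange_one_eq_nil
      omega
    rw [hnil]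
    rcases hrel with ⟨hp, hl⟩ | ⟨s, hp, hs, hi, hl⟩
    · subst hp; subst hl
      simp [upward_section_aLoop, pvC]
    · subst hp; subst hl
      simp only [upward_section_aLoop, List.map_nil, pvC]
      rw [if_pos (pv_slice_ne_nil LZ s i hs (lt_of_le_of_lt hs hi))]
  | succ k ih =>
    intro i hik lst p fj res hrel
    have hilt : (i : Int) < (LZ.length : Int) - 1 := by omega
    have hi1 : i + 1 < LZ.length := by omega
    have hcast : (i : Int) + 1 = ((i + 1 : Nat) : Int) := by push_cast; ring
    have hLZi : PySem.List.pyGetD LZ (i : Int) [] = LZ[i] := by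
      rw [PySem.List.pyGetD_natCast, List.getD_eq_getElem _ _ (by omega)]
    have hLZi1 : PySem.List.pyGetD LZ ((i : Int) + 1) [] = LZ[i + 1] := by
      rw [hcast, PySem.List.pyGetD_natCast, List.getD_eq_getElem _ _ hi1]
    have hrange : PySem.List.pyRange ((i : Int) + 1) ((LZ.length : Int) - 1) 1 =
        PySem.List.pyRange (((i + 1 : Nat)) : Int) ((LZ.length : Int) - 1) 1 := by rw [hcast]
    rw [PySem.List.pyRange_one_cons hilt, List.map_cons]
    by_cases hcond : PySem.List.pyGetD (PySem.List.pyGetD LZ (i : Int) []) 1 0 ≤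
        PySem.List.pyGetD (PySem.List.pyGetD LZ ((i : Int) + 1) []) 1 0
    · simp only [upward_section_aLoop, pvC, if_pos hcond, decide_eq_true hcond, reduceIte]
      rcases hrel with ⟨hp, hl⟩ | ⟨s, hp, hs, _, hl⟩
      · subst hp; subst hl
        rw [if_neg List.not_mem_nil, hLZi, hLZi1]
        have hpair : ([] : List (List Int)) ++ [LZ[i]] ++ [LZ[i + 1]] =
            PySem.List.slice LZ (some (i : Int)) (some (((i + 1 : Nat) : Int) + 1)) := by
          rw [← hcast]
          have h12 : (i : Int) + 1 + 1 = (i : Int) + 2 := by ring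
          rw [h12, pv_slice_pair LZ i hi1]
          simp
        rw [hpair, Option.getD_none, hrange]
        exact ih (i + 1) (by omega)
          (PySem.List.slice LZ (some (i : Int)) (some (((i + 1 : Nat) : Int) + 1)))
          (some i) fj res (Or.inr ⟨i, rfl, by omega, hi1, rfl⟩)
      · subst hp; subst hl
        have hmem : PySem.List.pyGetD LZ (i : Int) [] ∈
            PySem.List.slice LZ (some (s : Int)) (some ((i : Int) + 1)) := by
          rw [hLZi]; exact pv_mem_slice LZ s i hs (by omega)
        rw [if_pos hmem, hLZi1]
        have hsnoc : PySem.List.slice LZ (some (s : Int)) (some ((i : Int) + 1)) ++ [LZ[i + 1]] =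
            PySem.List.slice LZ (some (s : Int)) (some (((i + 1 : Nat) : Int) + 1)) := by
          rw [← hcast]
          have h12 : (i : Int) + 1 + 1 = (i : Int) + 2 := by ring
          rw [h12]
          exact (pv_slice_snoc LZ s i (by omega) hi1).symm
        rw [hsnoc, Option.getD_some, hrange]
        exact ih (i + 1) (by omega)
          (PySem.List.slice LZ (some (s : Int)) (some (((i + 1 : Nat) : Int) + 1)))
          (some s) fj res (Or.inr ⟨s, rfl, by omega, hi1, rfl⟩)
    · simp only [upward_section_aLoop, pvC, if_neg hcond, decide_eq_false hcond,
        Bool.false_eq_true, reduceIte]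
      rcases hrel with ⟨hp, hl⟩ | ⟨s, hp, hs, _, hl⟩
      · subst hp; subst hl
        rw [if_neg (by simp : ¬(List.length ([] : List (List Int)) > 0)), hrange]
        exact ih (i + 1) (by omega) [] none (fj + 1) res (Or.inl ⟨rfl, rfl⟩)
      · subst hp; subst hl
        rw [if_pos (show (PySem.List.slice LZ (some (s : Int)) (some ((i : Int) + 1))).length > 0
          from pv_slice_ne_nil LZ s i hs (by omega)), hrange]
        exact ih (i + 1) (by omega) [] none (fj + 1)
          (res.insert fj (PySem.List.slice LZ (some (s : Int)) (some ((i : Int) + 1))))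
          (Or.inl ⟨rfl, rfl⟩)

-- ===== VERDICT (by name: the statement is the Claim_ definition above) =====
theorem upward_section_spec : Claim_equal_upward_section := by
  intro LZ _ _
  unfold Spec_upward_section upward_section upward_section_alt
  have hA := aLoop_eq_pvC LZ (((LZ.length : Int) - 1).toNat) 0 (by omega) [] none 0
    PySem.Dict.empty (Or.inl ⟨rfl, rfl⟩)
  have hB := altLoop_eq_pvC LZ
    ((PySem.List.pyRange ((0 : Nat) : Int) ((LZ.length : Int) - 1) 1).map
      (fun i => decide (PySem.List.pyGetD (PySem.List.pyGetD LZ i []) 1 0 ≤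
        PySem.List.pyGetD (PySem.List.pyGetD LZ (i + 1) []) 1 0))) 0 0 PySem.Dict.empty
  exact congrArg PySem.Dict.items (hA.trans hB.symm)
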